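-- pv_equiv track=rewrite | github.com/DeanLight/spannerlib | spannerlib/magic.py | clean_query_lines
-- ===== SOURCE A (Python) =====
-- def clean_query_lines(code)->str:
--     """remove query lines from code by removing lines that start with '?' """
--     code_lines = code.split('\n')
--     non_query_lines = [line for line in code_lines if not line.startswith('?')]
--
--     # remove double empty lines
--     clean_code = []
--     for i, line in enumerate(non_query_lines):
--         if i>0 and not line and not non_query_lines[i-1]:
--             continue
--         clean_code.append(line)
--     clean_code = '\n'.join(clean_code)
--     return clean_code
-- ===== SOURCE B (Python) =====
-- def clean_query_lines(code)->str:
--     """remove query lines from code by removing lines that start with '?' """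
--     kept = [line for line in code.split('\n') if not line.startswith('?')]
--     out = []
--     i = 0
--     n = len(kept)
--     while i < n:
--         if kept[i] == '':
--             # a maximal run of empty lines collapses to a single empty line
--             out.append('')
--             while i < n and kept[i] == '':
--                 i += 1
--         else:
--             out.append(kept[i])
--             i += 1
--     return '\n'.join(out)
-- ===== Notes on version B (the rewrite author's own statement) =====
-- stated objective: alternative
-- what changed: The collapse step is rewritten as run-grouping: a while loop that, on meeting an empty line, emits one empty line and skips the whole maximal run of empty lines with an inner scan, instead of A's per-element enumerate loop that peeks backwards at the previous index.
import Mathlib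
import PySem

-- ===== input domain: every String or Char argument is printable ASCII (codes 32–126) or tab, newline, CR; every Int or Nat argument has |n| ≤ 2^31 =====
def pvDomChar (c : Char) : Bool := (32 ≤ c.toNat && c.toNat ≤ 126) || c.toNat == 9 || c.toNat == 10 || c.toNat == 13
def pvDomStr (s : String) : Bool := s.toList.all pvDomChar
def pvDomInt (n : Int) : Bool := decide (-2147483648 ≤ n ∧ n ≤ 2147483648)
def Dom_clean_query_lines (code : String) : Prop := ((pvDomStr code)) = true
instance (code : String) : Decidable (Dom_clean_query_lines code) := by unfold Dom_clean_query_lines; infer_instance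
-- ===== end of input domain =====

-- B replaces A's enumerate-with-lookback collapse by a run-grouping scan that emits one
-- '' per maximal run of empty lines and skips the run; objective: alternative decomposition.

-- ===== PORT A =====
def clean_query_lines (code : String) : String :=
  let code_lines := (PySem.Str.split? code "\n").getD []
  let non_query_lines := code_lines.filter (fun line => !(PySem.Str.startswith line "?"))
  let clean_code := (PySem.List.enumerate non_query_lines).foldl
    (fun acc p =>
      if decide (0 < p.1) && (p.2 == "") &&
          (PySem.List.pyGet? non_query_lines (p.1 - 1) == some "") then acc
      else acc ++ [p.2]) []
  PySem.Str.join "\n" clean_code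

-- ===== PORT B =====
-- run-grouping: on an empty line emit one "" and skip the whole run (the inner while
-- 'while i < n and kept[i] == "": i += 1' is the dropWhile); else emit the line.
def pvCollapseRuns : List String → List String
  | [] => []
  | x :: xs =>
    if x == "" then "" :: pvCollapseRuns (xs.dropWhile (fun l => l == ""))
    else x :: pvCollapseRuns xs
termination_by xs => xs.length
decreasing_by
  · exact Nat.lt_succ_of_le (List.length_dropWhile_le _ _)
  · exact Nat.lt_succ_self _

def clean_query_lines_alt (code : String) : String :=
  let kept := ((PySem.Str.split? code "\n").getD []).filter
    (fun line => !(PySem.Str.startswith line "?"))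
  PySem.Str.join "\n" (pvCollapseRuns kept)

-- ===== PRECONDITION & SPEC =====
def Spec_clean_query_lines (code : String) (out : String) : Prop := out = clean_query_lines_alt code
instance (code : String) (out : String) : Decidable (Spec_clean_query_lines code out) := by unfold Spec_clean_query_lines; infer_instance

-- ===== CLAIM =====
def Claim_equal_clean_query_lines : Prop := ∀ (code : String), Dom_clean_query_lines code → Spec_clean_query_lines code (clean_query_lines code)

-- ===== LEMMAS AND PROOFS =====

-- a flag-state step used only as a proof intermediary between A's loop and pvCollapseRuns
def pvStepB (st : List String × Bool) (line : String) : List String × Bool :=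
  if line == "" then (if st.2 then st.1 else st.1 ++ [line], true)
  else (st.1 ++ [line], false)

theorem pvGet_prev (pre suf : List String) (h : pre ≠ []) :
    PySem.List.pyGet? (pre ++ suf) ((pre.length : Int) - 1) = pre.getLast? := by
  have hp : ((pre.length : Int) - 1) = ((pre.length - 1 : Nat) : Int) := by
    have := List.length_pos_iff.mpr h; omega
  rw [hp, PySem.List.pyGet?_natCast]
  rw [List.getElem?_append_left (by have := List.length_pos_iff.mpr h; omega)]
  rw [List.getLast?_eq_getElem?]

-- A's enumerate-and-peek loop equals the flag fold, generalized over a consumed prefix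
theorem pvLoop_eq (suf : List String) : ∀ (pre acc L : List String),
    L = pre ++ suf →
    (PySem.List.enumerate suf (pre.length : Int)).foldl
      (fun a p =>
        if decide (0 < p.1) && (p.2 == "") &&
            (PySem.List.pyGet? L (p.1 - 1) == some "") then a
        else a ++ [p.2]) acc
    = (suf.foldl pvStepB (acc, pre.getLast? == some "")).1 := by
  induction suf with
  | nil => intro pre acc L _; simp [PySem.List.enumerate_nil]
  | cons x xs ih =>
    intro pre acc L hL
    subst hL
    rw [PySem.List.enumerate_cons, List.foldl_cons]
    have hlen : (pre.length : Int) + 1 = (((pre ++ [x]).length : Nat) : Int) := by simp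
    have hassoc : pre ++ x :: xs = (pre ++ [x]) ++ xs := by simp
    rw [hlen, ih (pre ++ [x]) _ (pre ++ x :: xs) hassoc]
    rw [List.foldl_cons]
    congr 1
    rw [List.getLast?_concat]
    by_cases hne : pre = []
    · subst hne
      simp only [List.length_nil, Nat.cast_zero]
      by_cases hx : x = ""
      · simp [hx, pvStepB]
      · have hb : (x == "") = false := by simpa using hx
        simp [hb, pvStepB]
    · rw [pvGet_prev pre (x :: xs) hne]
      have hpos : (0:Int) < pre.length := by
        exact_mod_cast List.length_pos_iff.mpr hne
      simp only [decide_eq_true hpos, Bool.true_and]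
      by_cases hx : x = ""
      · by_cases hp : pre.getLast? = some "" <;> simp [hx, hp, pvStepB]
      · have hb : (x == "") = false := by simpa using hx
        simp [hb, pvStepB]

-- the flag fold equals the run-grouping recursion, both flag values at once
theorem pvFold_collapse (xs : List String) : ∀ (acc : List String),
    (xs.foldl pvStepB (acc, false)).1 = acc ++ pvCollapseRuns xs ∧
    (xs.foldl pvStepB (acc, true)).1
      = acc ++ pvCollapseRuns (xs.dropWhile (fun l => l == "")) := by
  induction xs with
  | nil => intro acc; simp [pvCollapseRuns]
  | cons x xs ih =>
    intro acc
    by_cases hx : x = ""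
    · subst hx
      constructor
      · simp only [List.foldl_cons, pvStepB]
        rw [pvCollapseRuns]
        simpa using (ih (acc ++ [""])).2
      · simp only [List.foldl_cons, pvStepB, List.dropWhile_cons]
        simpa using (ih acc).2
    · have hb : (x == "") = false := by simpa using hx
      constructor
      · simp only [List.foldl_cons, pvStepB, hb, Bool.false_eq_true, if_false]
        rw [pvCollapseRuns, if_neg (by simpa using hx)]
        simpa using (ih (acc ++ [x])).1
      · simp only [List.foldl_cons, pvStepB, hb, Bool.false_eq_true, if_false,
          List.dropWhile_cons]
        rw [pvCollapseRuns, if_neg (by simpa using hx)]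
        simpa using (ih (acc ++ [x])).1

-- ===== VERDICT =====
theorem clean_query_lines_spec : Claim_equal_clean_query_lines := by
  intro code _
  simp only [Spec_clean_query_lines, clean_query_lines, clean_query_lines_alt]
  set kept := (((PySem.Str.split? code "\n").getD []).filter
    (fun line => !(PySem.Str.startswith line "?"))) with hk
  have h := pvLoop_eq kept [] [] kept (by simp)
  simp only [List.length_nil, Nat.cast_zero, List.getLast?_nil] at h
  rw [h, show ((none : Option String) == some "") = false from rfl,
    (pvFold_collapse kept []).1]
  simp
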